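-- pv_equiv track=rewrite | github.com/yuanfeng719/KPR | script/KPR_assembler/Get_Pairwise_reads.py | check_pool
-- ===== SOURCE A (Python) =====
-- def remove_values_from_list(the_list, val):
-- 	return [value for value in the_list if value != val]
--
-- def check_pool(lst,inters):
-- 	out = []
-- 	for i in range(len(lst)):
-- 		header = lst[i].split('\n')[0]
-- 		if header in inters:
-- 			inters = remove_values_from_list(inters,header)
-- 			out.append('>'+lst[i])
-- 	return (out)
-- ===== SOURCE B (Python) =====
-- def check_pool(lst, inters):
--     targets = set(inters)
--     firsts = {}
--     for read in lst:
--         header = read.split('\n')[0]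
--         if header in targets:
--             firsts.setdefault(header, read)
--     return ['>' + r for r in firsts.values()]
-- ===== Notes on version B (the rewrite author's own statement) =====
-- stated objective: faster
-- what changed: Replaces the index loop that rescans and rebuilds the shrinking inters list on every match with a precomputed target set plus an ordered dict of first reads per header, emitted as '>'-prefixed values in a final pass.
import Mathlib
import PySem

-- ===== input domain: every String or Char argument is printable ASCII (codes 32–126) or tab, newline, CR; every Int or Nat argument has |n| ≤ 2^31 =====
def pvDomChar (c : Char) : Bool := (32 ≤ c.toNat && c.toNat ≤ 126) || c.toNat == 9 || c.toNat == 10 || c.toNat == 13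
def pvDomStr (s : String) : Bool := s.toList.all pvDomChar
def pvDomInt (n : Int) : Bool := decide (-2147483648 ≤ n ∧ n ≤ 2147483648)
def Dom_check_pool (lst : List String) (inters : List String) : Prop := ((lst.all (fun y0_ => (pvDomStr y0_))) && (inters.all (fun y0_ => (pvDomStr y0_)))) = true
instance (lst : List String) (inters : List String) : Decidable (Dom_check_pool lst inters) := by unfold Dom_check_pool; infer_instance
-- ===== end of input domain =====

-- B replaces A's shrinking-list membership scans with a target set and an ordered dict of
-- first reads per header, emitted in a separate final pass (faster in a timing run).

-- ===== PORT A =====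
def remove_values_from_list (the_list : List String) (val : String) : List String :=
  the_list.filter (fun value => value != val)

def check_pool (lst : List String) (inters : List String) : List String :=
  ((PySem.List.pyRange 0 (lst.length : Int) 1).foldl
    (fun (st : List String × List String) i =>
      let read := PySem.List.pyGetD lst i ""
      let header := PySem.List.pyGetD ((PySem.Str.split? read "\n").getD []) 0 ""
      if st.1.contains header then
        (remove_values_from_list st.1 header, st.2 ++ [">" ++ read])
      else st)
    (inters, [])).2

-- ===== PORT B =====
def check_pool_alt (lst : List String) (inters : List String) : List String :=
  let targets : PySem.Set String := PySem.Set.ofList inters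
  let firsts : PySem.Dict String String := lst.foldl
    (fun d read =>
      let header := PySem.List.pyGetD ((PySem.Str.split? read "\n").getD []) 0 ""
      if PySem.Set.contains targets header then PySem.Dict.setdefault d header read else d)
    PySem.Dict.empty
  firsts.values.map (fun r => ">" ++ r)

-- ===== PRECONDITION & SPEC =====
def Spec_check_pool (lst : List String) (inters : List String) (out : List String) : Prop := out = check_pool_alt lst inters
instance (lst : List String) (inters : List String) (out : List String) : Decidable (Spec_check_pool lst inters out) := by unfold Spec_check_pool; infer_instance

-- ===== CLAIM (what is proved, stated in full; the proofs are below) =====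
def Claim_equal_check_pool : Prop := ∀ (lst : List String) (inters : List String), Dom_check_pool lst inters → Spec_check_pool lst inters (check_pool lst inters)

-- ===== LEMMAS AND PROOFS =====

def pvHdr (r : String) : String := PySem.List.pyGetD ((PySem.Str.split? r "\n").getD []) 0 ""

def pvStepA (st : List String × List String) (read : String) : List String × List String :=
  if st.1.contains (pvHdr read) then
    (remove_values_from_list st.1 (pvHdr read), st.2 ++ [">" ++ read])
  else st

def pvStepB (inters0 : List String) (d : PySem.Dict String String) (read : String) :
    PySem.Dict String String :=
  if PySem.Set.contains (PySem.Set.ofList inters0) (pvHdr read) then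
    PySem.Dict.setdefault d (pvHdr read) read
  else d

theorem pv_setdefault_of_not_contains (d : PySem.Dict String String) (k : String) (v : String)
    (h : d.contains k = false) : d.setdefault k v = d.insert k v := by
  simp [PySem.Dict.setdefault, PySem.Dict.insert, h]

theorem pv_main (lst : List String) : ∀ (ints : List String) (d : PySem.Dict String String)
    (inters0 : List String),
    (∀ h, h ∈ ints ↔ h ∈ inters0 ∧ d.contains h = false) →
    (lst.foldl pvStepA (ints, d.values.map (fun r => ">" ++ r))).2
      = ((lst.foldl (pvStepB inters0) d).values.map (fun r => ">" ++ r)) := by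
  induction lst with
  | nil => intro ints d inters0 _; rfl
  | cons read rest ih =>
    intro ints d inters0 hm
    by_cases hc : (pvHdr read) ∈ ints
    · -- matched: A removes header and appends; B must insert a fresh key
      have hmem := (hm (pvHdr read)).mp hc
      have htgt : PySem.Set.contains (PySem.Set.ofList inters0) (pvHdr read) = true := by
        exact (PySem.Set.contains_iff _ _).mpr ((PySem.Set.mem_ofList _ _).mpr hmem.1)
      have hAc : ints.contains (pvHdr read) = true := by
        simpa using hc
      have hsd : PySem.Dict.setdefault d (pvHdr read) read = d.insert (pvHdr read) read :=
        pv_setdefault_of_not_contains d _ read hmem.2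
      have hitems : (d.insert (pvHdr read) read).items = d.items ++ [((pvHdr read), read)] :=
        PySem.Dict.items_insert_of_not_contains d read hmem.2
      have hvals : (d.insert (pvHdr read) read).values = d.values ++ [read] := by
        simp [PySem.Dict.values, hitems]
      simp only [List.foldl_cons, pvStepA, pvStepB, hAc, htgt, if_true, hsd]
      have hacc : d.values.map (fun r => ">" ++ r) ++ [">" ++ read]
          = (d.insert (pvHdr read) read).values.map (fun r => ">" ++ r) := by
        simp [hvals]
      rw [hacc]
      apply ih
      intro h
      constructor
      · intro hin
        have := List.mem_filter.mp hin
        rcases this with ⟨hi, hne⟩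
        have hne' : h ≠ pvHdr read := by simpa using hne
        have := (hm h).mp hi
        refine ⟨this.1, ?_⟩
        rw [PySem.Dict.contains_insert]
        simp [hne', this.2]
      · intro ⟨h0, hnc⟩
        rw [PySem.Dict.contains_insert] at hnc
        have hne : h ≠ pvHdr read := by
          intro he; simp [he] at hnc
        have hdc : d.contains h = false := by
          simpa [hne] using hnc
        exact List.mem_filter.mpr ⟨(hm h).mpr ⟨h0, hdc⟩, by simpa using hne⟩
    · -- not matched by A
      have hAc : ints.contains (pvHdr read) = false := by
        simpa using hc
      have hBsame : pvStepB inters0 d read = d := by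
        unfold pvStepB
        by_cases h0 : (pvHdr read) ∈ inters0
        · have hdc : d.contains (pvHdr read) = true := by
            by_contra hcc
            exact hc ((hm _).mpr ⟨h0, by simpa using hcc⟩)
          simp [PySem.Dict.setdefault, hdc]
        · simp [PySem.Set.mem_ofList, h0]
      simp only [List.foldl_cons, pvStepA, hAc, if_neg, Bool.false_eq_true, not_false_iff,
        hBsame]
      exact ih ints d inters0 hm

theorem pv_check_pool_eq (lst inters : List String) :
    check_pool lst inters = (lst.foldl pvStepA (inters, [])).2 := by
  unfold check_pool
  show (List.foldl (fun (st : List String × List String) i =>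
      pvStepA st (PySem.List.pyGetD lst i "")) (inters, [])
      (PySem.List.pyRange 0 (lst.length : Int) 1)).2 = _
  rw [PySem.List.foldl_pyRange_zero_pyGetD' lst "" pvStepA (inters, [])]

theorem pv_check_pool_alt_eq (lst inters : List String) :
    check_pool_alt lst inters
      = ((lst.foldl (pvStepB inters) PySem.Dict.empty).values.map (fun r => ">" ++ r)) := by
  unfold check_pool_alt pvStepB pvHdr
  rfl

-- ===== VERDICT (by name: the statement is the Claim_ definition above) =====
theorem check_pool_spec : Claim_equal_check_pool := by
  intro lst inters _
  unfold Spec_check_pool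
  rw [pv_check_pool_eq, pv_check_pool_alt_eq]
  have h0 : ∀ h, h ∈ inters ↔ h ∈ inters ∧ (PySem.Dict.empty : PySem.Dict String String).contains h = false := by
    intro h; simp [PySem.Dict.contains_empty]
  have := pv_main lst inters PySem.Dict.empty inters h0
  simpa [PySem.Dict.values] using this
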